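-- pv_equiv track=rewrite | github.com/trhariharasudhan/GrandpaAssistant | backend/app/features/productivity/proactive_suggestion_engine.py | _dedupe_suggestions
-- ===== SOURCE A (Python) =====
-- def _normalize_text(value):
--     return " ".join(str(value or "").split()).strip()
--
-- def _dedupe_suggestions(items, limit=6):
--     ranked = {}
--     for kind, text, score in items:
--         normalized = _normalize_text(text)
--         if not normalized:
--             continue
--         current = ranked.get(normalized)
--         if not current or score > current[2]:
--             ranked[normalized] = (kind, normalized, score)
--     ordered = sorted(ranked.values(), key=lambda item: (-item[2], item[1]))
--     return ordered[:limit]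
-- ===== SOURCE B (Python) =====
-- def _normalize_text(value):
--     return " ".join(str(value or "").split()).strip()
--
-- def _dedupe_suggestions(items, limit=6):
--     norm = []
--     for kind, text, score in items:
--         n = _normalize_text(text)
--         if n:
--             norm.append((kind, n, score))
--     best = [max((it for it in norm if it[1] == n), key=lambda it: it[2])
--             for n in dict.fromkeys(it[1] for it in norm)]
--     best.sort(key=lambda it: (-it[2], it[1]))
--     return best[:limit]
-- ===== Notes on version B (the rewrite author's own statement) =====
-- stated objective: alternative
-- what changed: Replaces the running-max dict with a declarative group-by: collect the distinct normalized texts in first-seen order, pick each group's best item with max(key=score) (first maximum), then sort once and slice.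
import Mathlib
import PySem

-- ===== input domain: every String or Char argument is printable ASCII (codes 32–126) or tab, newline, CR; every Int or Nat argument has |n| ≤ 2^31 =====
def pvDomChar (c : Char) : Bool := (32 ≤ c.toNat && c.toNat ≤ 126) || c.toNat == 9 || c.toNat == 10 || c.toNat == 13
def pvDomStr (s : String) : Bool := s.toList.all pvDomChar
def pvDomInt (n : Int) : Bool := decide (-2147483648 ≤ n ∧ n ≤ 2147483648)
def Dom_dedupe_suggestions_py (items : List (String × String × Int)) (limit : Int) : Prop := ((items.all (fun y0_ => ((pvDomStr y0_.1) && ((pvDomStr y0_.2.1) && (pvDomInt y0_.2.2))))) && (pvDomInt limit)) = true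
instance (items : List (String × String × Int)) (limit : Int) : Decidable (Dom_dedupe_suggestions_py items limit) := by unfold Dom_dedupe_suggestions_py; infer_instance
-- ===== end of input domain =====

-- B replaces the running-max dict with a group-by: distinct normalized texts in first-seen
-- order, each group's best item via max(key=score), then one sort and the same slice.

-- shared helper: port of _normalize_text (both Pythons use this same helper)
def pvNormalize (value : String) : String :=
  PySem.Str.strip (PySem.Str.join " " (PySem.Str.split₀ (if value = "" then "" else value)))

-- ===== PORT A =====
def dedupe_suggestions_py (items : List (String × String × Int)) (limit : Int) : List (String × String × Int) :=
  let ranked : PySem.Dict String (String × String × Int) :=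
    items.foldl (fun ranked item =>
      let normalized := pvNormalize item.2.1
      if normalized = "" then ranked
      else
        match ranked.get? normalized with
        | none => ranked.insert normalized (item.1, normalized, item.2.2)
        | some current =>
            if current.2.2 < item.2.2 then ranked.insert normalized (item.1, normalized, item.2.2)
            else ranked) PySem.Dict.empty
  let ordered := PySem.List.sorted2 ranked.values (fun item => -item.2.2) (fun item => item.2.1)
  PySem.List.slice ordered none (some limit)

-- ===== PORT B =====
def dedupe_suggestions_py_alt (items : List (String × String × Int)) (limit : Int) : List (String × String × Int) :=
  let norm : List (String × String × Int) :=
    items.filterMap (fun item =>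
      let n := pvNormalize item.2.1
      if n = "" then none else some (item.1, n, item.2.2))
  -- max(..., key=lambda it: it[2]) is PySem.List.max?; each group is nonempty (its text
  -- comes from norm itself), so filterMap's none branch is unreachable (totalisation only)
  let best : List (String × String × Int) :=
    (PySem.List.dedup (norm.map (fun it => it.2.1))).filterMap
      (fun n => PySem.List.max? (norm.filter (fun it => it.2.1 == n)) (fun it => it.2.2))
  let sortedB := PySem.List.sorted2 best (fun it => -it.2.2) (fun it => it.2.1)
  PySem.List.slice sortedB none (some limit)

-- ===== PRECONDITION & SPEC =====
def Spec_dedupe_suggestions_py (items : List (String × String × Int)) (limit : Int) (out : List (String × String × Int)) : Prop := out = dedupe_suggestions_py_alt items limit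
instance (items : List (String × String × Int)) (limit : Int) (out : List (String × String × Int)) : Decidable (Spec_dedupe_suggestions_py items limit out) := by unfold Spec_dedupe_suggestions_py; infer_instance

-- ===== CLAIM =====
def Claim_equal_dedupe_suggestions_py : Prop := ∀ (items : List (String × String × Int)) (limit : Int), Dom_dedupe_suggestions_py items limit → Spec_dedupe_suggestions_py items limit (dedupe_suggestions_py items limit)

-- ===== LEMMAS AND PROOFS =====

-- the filtered, normalized item list both programs effectively process
def pvF (items : List (String × String × Int)) : List (String × String × Int) :=
  items.filterMap (fun item =>
    let n := pvNormalize item.2.1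
    if n = "" then none else some (item.1, n, item.2.2))

-- "keep the strictly better-scoring item" step (first maximum wins)
def pvStep (acc : Option (String × String × Int)) (y : String × String × Int) :
    Option (String × String × Int) :=
  match acc with
  | none => some y
  | some c => if c.2.2 < y.2.2 then some y else some c

def pvWin (g : List (String × String × Int)) : Option (String × String × Int) :=
  g.foldl pvStep none

-- Python's max(key=...) (first maximal element) is exactly the running-max loop
lemma pvMax?_eq_pvWin (g : List (String × String × Int)) :
    PySem.List.max? g (fun it => it.2.2) = pvWin g := by
  unfold PySem.List.max? pvWin
  congr 1
  funext acc y
  cases acc <;> simp [pvStep]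

lemma pvWin_char (g : List (String × String × Int)) (c x : String × String × Int) :
    g.foldl pvStep (some c) = some x ↔
      ∃ l r, c :: g = l ++ x :: r ∧ (∀ y ∈ l, y.2.2 < x.2.2) ∧ (∀ y ∈ r, y.2.2 ≤ x.2.2) := by
  induction g generalizing c with
  | nil =>
    simp only [List.foldl_nil, Option.some_inj]
    constructor
    · rintro rfl; exact ⟨[], [], rfl, by simp, by simp⟩
    · rintro ⟨l, r, h, hl, hr⟩
      cases l with
      | nil => simp at h; exact h.1
      | cons a l' => simp at h
  | cons y t ih =>
    simp only [List.foldl_cons]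
    by_cases hcy : c.2.2 < y.2.2
    · have hstep : pvStep (some c) y = some y := by simp [pvStep, hcy]
      rw [hstep, ih]
      constructor
      · rintro ⟨l, r, h, hl, hr⟩
        refine ⟨c :: l, r, by simp [h], ?_, hr⟩
        intro z hz
        rcases List.mem_cons.mp hz with rfl | hz'
        · cases l with
          | nil =>
            rw [List.nil_append] at h
            injection h with h1 h2
            exact h1 ▸ hcy
          | cons a l'' =>
            rw [List.cons_append] at h
            injection h with h1 h2
            exact hcy.trans (by rw [h1]; exact hl a (by simp))
        · exact hl z hz'
      · rintro ⟨l, r, h, hl, hr⟩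
        cases l with
        | nil =>
          rw [List.nil_append] at h
          injection h with h1 h2
          subst h1; subst h2
          exact absurd hcy (not_lt.mpr (hr y (by simp)))
        | cons a l' =>
          rw [List.cons_append] at h
          injection h with h1 h2
          subst h1
          exact ⟨l', r, h2, fun z hz => hl z (List.mem_cons_of_mem _ hz), hr⟩
    · have hstep : pvStep (some c) y = some c := by simp [pvStep, hcy]
      rw [hstep, ih]
      have hyc : y.2.2 ≤ c.2.2 := not_lt.mp hcy
      constructor
      · rintro ⟨l, r, h, hl, hr⟩
        cases l with
        | nil =>
          rw [List.nil_append] at h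
          injection h with h1 h2
          subst h1; subst h2
          refine ⟨[], y :: t, rfl, by simp, ?_⟩
          intro z hz
          rcases List.mem_cons.mp hz with rfl | hz'
          · exact hyc
          · exact hr z hz'
        | cons a l' =>
          rw [List.cons_append] at h
          injection h with h1 h2
          subst h1
          have hcx : c.2.2 < x.2.2 := hl c (by simp)
          refine ⟨c :: y :: l', r, by simp [h2], ?_, hr⟩
          intro z hz
          rcases List.mem_cons.mp hz with rfl | hz'
          · exact hcx
          · rcases List.mem_cons.mp hz' with rfl | hz''
            · exact lt_of_le_of_lt hyc hcx
            · exact hl z (List.mem_cons_of_mem _ hz'')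
      · rintro ⟨l, r, h, hl, hr⟩
        cases l with
        | nil =>
          rw [List.nil_append] at h
          injection h with h1 h2
          subst h1; subst h2
          exact ⟨[], t, rfl, by simp, fun z hz => hr z (List.mem_cons_of_mem _ hz)⟩
        | cons a l' =>
          rw [List.cons_append] at h
          injection h with h1 h2
          subst h1
          cases l' with
          | nil =>
            rw [List.nil_append] at h2
            injection h2 with h3 h4
            subst h3
            exact absurd (hl c (by simp)) hcy
          | cons b l'' =>
            rw [List.cons_append] at h2
            injection h2 with h3 h4
            subst h3
            refine ⟨c :: l'', r, by simp [h4], ?_, hr⟩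
            intro z hz
            rcases List.mem_cons.mp hz with rfl | hz'
            · exact hl z (by simp)
            · exact hl z (by simp [hz'])

lemma pvWin_char' (g : List (String × String × Int)) (x : String × String × Int) :
    pvWin g = some x ↔
      ∃ l r, g = l ++ x :: r ∧ (∀ y ∈ l, y.2.2 < x.2.2) ∧ (∀ y ∈ r, y.2.2 ≤ x.2.2) := by
  cases g with
  | nil =>
    constructor
    · intro h; simp [pvWin] at h
    · rintro ⟨l, r, h, -, -⟩; exact absurd h (by simp)
  | cons y t =>
    have : pvWin (y :: t) = t.foldl pvStep (some y) := by simp [pvWin, pvStep]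
    rw [this, pvWin_char]

lemma pvWin_mem {g : List (String × String × Int)} {x : String × String × Int}
    (h : pvWin g = some x) : x ∈ g := by
  rcases (pvWin_char' g x).mp h with ⟨l, r, hg, -, -⟩
  rw [hg]; simp

lemma pvSorted2_toLex {α : Type} (xs : List α) (k1 : α → Int) (k2 : α → String) :
    PySem.List.sorted2 xs k1 k2 = PySem.List.sorted xs (fun x => toLex (k1 x, k2 x)) := by
  rw [PySem.List.sorted_eq_foldl_insertBy]
  have hb : (fun a b => decide (k1 a < k1 b) || (!decide (k1 b < k1 a) && decide (k2 a < k2 b)))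
      = (fun a b => decide (toLex (k1 a, k2 a) < toLex (k1 b, k2 b))) := by
    funext a b
    by_cases h1 : k1 a < k1 b <;> by_cases h2 : k1 b < k1 a
    · exact absurd h2 (lt_asymm h1)
    · simp [Prod.Lex.toLex_lt_toLex, h1]
    · simp only [Prod.Lex.toLex_lt_toLex, h1, h2, decide_true, decide_false, Bool.not_true,
        Bool.false_and, Bool.or_false, decide_eq_true_eq]
      symm
      rw [decide_eq_false_iff_not]
      intro hx
      rcases hx with hx | ⟨he, -⟩
      · exact hx
      · exact absurd h2 (by rw [he]; exact lt_irrefl _)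
    · have he : k1 a = k1 b := le_antisymm (not_lt.mp h2) (not_lt.mp h1)
      simp [Prod.Lex.toLex_lt_toLex, h1, h2, he]
  simp only [PySem.List.sorted2, hb]
  rfl

lemma pvA_get (items : List (String × String × Int))
    (d : PySem.Dict String (String × String × Int)) (n : String) :
    (items.foldl (fun ranked item =>
      let normalized := pvNormalize item.2.1
      if normalized = "" then ranked
      else
        match ranked.get? normalized with
        | none => ranked.insert normalized (item.1, normalized, item.2.2)
        | some current =>
            if current.2.2 < item.2.2 then ranked.insert normalized (item.1, normalized, item.2.2)
            else ranked) d).get? n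
    = ((pvF items).filter (fun o => o.2.1 == n)).foldl pvStep (d.get? n) := by
  induction items generalizing d with
  | nil => simp [pvF]
  | cons it t ih =>
    simp only [List.foldl_cons, pvF, List.filterMap_cons] at *
    by_cases h : pvNormalize it.2.1 = ""
    · simp [h, ih]
    · simp only [h, if_neg, if_false, Option.toList]
      by_cases hn : pvNormalize it.2.1 = n
      · subst hn
        cases hd : d.get? (pvNormalize it.2.1) with
        | none =>
          simp [h, ih, hd, pvStep, PySem.Dict.get?_insert_self]
        | some c =>
          by_cases hs : c.2.2 < it.2.2
          · simp [h, ih, hd, hs, pvStep, PySem.Dict.get?_insert_self]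
          · simp [h, ih, hd, hs, pvStep]
      · have hbe : ((pvNormalize it.2.1 == n) = false) := by simp [hn]
        cases hd : d.get? (pvNormalize it.2.1) with
        | none =>
          simp [h, ih, hd, hbe, PySem.Dict.get?_insert_of_ne _ _ (Ne.symm hn)]
        | some c =>
          by_cases hs : c.2.2 < it.2.2
          · simp [h, ih, hd, hs, hbe, PySem.Dict.get?_insert_of_ne _ _ (Ne.symm hn)]
          · simp [h, ih, hd, hs, hbe]

-- A's dict as a named object
def pvAdict (items : List (String × String × Int)) :
    PySem.Dict String (String × String × Int) :=
  items.foldl (fun ranked item =>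
      let normalized := pvNormalize item.2.1
      if normalized = "" then ranked
      else
        match ranked.get? normalized with
        | none => ranked.insert normalized (item.1, normalized, item.2.2)
        | some current =>
            if current.2.2 < item.2.2 then ranked.insert normalized (item.1, normalized, item.2.2)
            else ranked) PySem.Dict.empty

lemma pvAdict_get (items : List (String × String × Int)) (n : String) :
    (pvAdict items).get? n = pvWin ((pvF items).filter (fun o => o.2.1 == n)) := by
  rw [pvAdict, pvA_get, pvWin]
  simp [PySem.Dict.get?_empty]

lemma pvAdict_nodup_keys_aux (items : List (String × String × Int))
    (d : PySem.Dict String (String × String × Int)) (hd : d.keys.Nodup) :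
    ((items.foldl (fun ranked item =>
      let normalized := pvNormalize item.2.1
      if normalized = "" then ranked
      else
        match ranked.get? normalized with
        | none => ranked.insert normalized (item.1, normalized, item.2.2)
        | some current =>
            if current.2.2 < item.2.2 then ranked.insert normalized (item.1, normalized, item.2.2)
            else ranked) d).keys).Nodup := by
  induction items generalizing d with
  | nil => simpa
  | cons it t ih =>
    simp only [List.foldl_cons]
    apply ih
    by_cases h : pvNormalize it.2.1 = ""
    · simpa [h]
    · simp only [h, if_false]
      cases hget : d.get? (pvNormalize it.2.1) with
      | none => exact PySem.Dict.nodup_keys_insert _ _ _ hd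
      | some c =>
        by_cases hs : c.2.2 < it.2.2
        · simpa [hs] using PySem.Dict.nodup_keys_insert d (pvNormalize it.2.1) _ hd
        · simpa [hs]

lemma pvAdict_nodup_keys (items : List (String × String × Int)) :
    (pvAdict items).keys.Nodup :=
  pvAdict_nodup_keys_aux items PySem.Dict.empty PySem.Dict.nodup_keys_empty

-- any dict value's middle component is its key
lemma pvAdict_key_of_mem {items : List (String × String × Int)}
    {kv : String × String × String × Int} (h : kv ∈ (pvAdict items).items) :
    kv.2.2.1 = kv.1 := by
  have hget : (pvAdict items).get? kv.1 = some kv.2 :=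
    (PySem.Dict.get?_eq_some_iff_mem_items _ _ _ (pvAdict_nodup_keys items)).mpr h
  rw [pvAdict_get] at hget
  have hmem := pvWin_mem hget
  have := List.of_mem_filter hmem
  exact eq_of_beq this

lemma pvAdict_values_mem (items : List (String × String × Int))
    (x : String × String × Int) :
    x ∈ (pvAdict items).values ↔
      pvWin ((pvF items).filter (fun o => o.2.1 == x.2.1)) = some x := by
  constructor
  · intro hx
    simp only [PySem.Dict.values, List.mem_map] at hx
    obtain ⟨kv, hkv, rfl⟩ := hx
    have hget : (pvAdict items).get? kv.1 = some kv.2 :=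
      (PySem.Dict.get?_eq_some_iff_mem_items _ _ _ (pvAdict_nodup_keys items)).mpr hkv
    rw [pvAdict_get] at hget
    rw [pvAdict_key_of_mem hkv]
    exact hget
  · intro h
    have hget : (pvAdict items).get? x.2.1 = some x := by rw [pvAdict_get]; exact h
    have hmem := PySem.Dict.mem_items_of_get?_eq_some _ hget
    simp only [PySem.Dict.values, List.mem_map]
    exact ⟨(x.2.1, x), hmem, rfl⟩

lemma pvAdict_values_pairwise (items : List (String × String × Int)) :
    (pvAdict items).values.Pairwise (fun a b => a.2.1 ≠ b.2.1) := by
  have hkeys : (pvAdict items).keys.Nodup := pvAdict_nodup_keys items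
  simp only [PySem.Dict.keys, List.Nodup, List.pairwise_map] at hkeys
  simp only [PySem.Dict.values, List.pairwise_map]
  refine hkeys.imp_of_mem ?_
  intro a b ha hb hne
  rw [pvAdict_key_of_mem ha, pvAdict_key_of_mem hb]
  exact hne

-- B's per-text selection as a named object
def pvBest (norm : List (String × String × Int)) : List (String × String × Int) :=
  (PySem.List.dedup (norm.map (fun it => it.2.1))).filterMap
    (fun n => PySem.List.max? (norm.filter (fun it => it.2.1 == n)) (fun it => it.2.2))

lemma pvBest_text_of_eq {norm : List (String × String × Int)} {n : String}
    {x : String × String × Int}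
    (h : PySem.List.max? (norm.filter (fun it => it.2.1 == n)) (fun it => it.2.2) = some x) :
    x.2.1 = n := by
  rw [pvMax?_eq_pvWin] at h
  exact eq_of_beq (List.mem_filter.mp (pvWin_mem h)).2

lemma pvBest_mem (norm : List (String × String × Int)) (x : String × String × Int) :
    x ∈ pvBest norm ↔ pvWin (norm.filter (fun o => o.2.1 == x.2.1)) = some x := by
  constructor
  · intro hx
    obtain ⟨n, -, hn⟩ := List.mem_filterMap.mp hx
    have := pvBest_text_of_eq hn
    rw [pvMax?_eq_pvWin] at hn
    rw [← this] at hn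
    exact hn
  · intro h
    apply List.mem_filterMap.mpr
    refine ⟨x.2.1, ?_, by rw [pvMax?_eq_pvWin]; exact h⟩
    rw [PySem.List.mem_dedup]
    exact List.mem_map.mpr ⟨x, List.mem_of_mem_filter (pvWin_mem h), rfl⟩

lemma pvBest_pairwise (norm : List (String × String × Int)) :
    (pvBest norm).Pairwise (fun a b => a.2.1 ≠ b.2.1) := by
  have hnd : (PySem.List.dedup (norm.map (fun it => it.2.1))).Pairwise (fun a b => a ≠ b) :=
    PySem.List.nodup_dedup _
  rw [pvBest]
  rw [List.pairwise_filterMap]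
  refine hnd.imp_of_mem ?_
  intro a b _ _ hne x hx y hy
  rw [pvBest_text_of_eq hx, pvBest_text_of_eq hy]
  exact hne

-- the two selections are permutations of one another
lemma pvPerm (items : List (String × String × Int)) :
    (pvBest (pvF items)).Perm (pvAdict items).values := by
  have h1 : (pvBest (pvF items)).Nodup :=
    (pvBest_pairwise (pvF items)).imp (fun hne he => hne (by rw [he]))
  have h2 : (pvAdict items).values.Nodup :=
    (pvAdict_values_pairwise items).imp (fun hne he => hne (by rw [he]))
  refine (List.perm_ext_iff_of_nodup h1 h2).mpr ?_
  intro x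
  rw [pvBest_mem, pvAdict_values_mem]

-- equal sorted lists
lemma pvSorted_eq (items : List (String × String × Int)) :
    PySem.List.sorted2 (pvAdict items).values (fun it => -it.2.2) (fun it => it.2.1)
      = PySem.List.sorted2 (pvBest (pvF items)) (fun it => -it.2.2) (fun it => it.2.1) := by
  rw [pvSorted2_toLex, pvSorted2_toLex]
  apply PySem.List.sorted_eq_of_perm_of_pairwise_lt
  · exact (PySem.List.sorted_perm _ _ _).trans (pvPerm items)
  · have hle := PySem.List.sorted_pairwise (pvBest (pvF items))
      (fun x => toLex (-x.2.2, x.2.1))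
    have hsym : ∀ {a b : String × String × Int}, a.2.1 ≠ b.2.1 → b.2.1 ≠ a.2.1 :=
      fun h => Ne.symm h
    have hne : (PySem.List.sorted (pvBest (pvF items)) (fun x => toLex (-x.2.2, x.2.1))).Pairwise
        (fun a b => a.2.1 ≠ b.2.1) :=
      ((PySem.List.sorted_perm _ _ _).pairwise_iff hsym).mpr (pvBest_pairwise (pvF items))
    refine (hle.and hne).imp ?_
    rintro a b ⟨hab, hne'⟩
    refine lt_of_le_of_ne hab ?_
    intro he
    exact hne' (congrArg (fun z => (ofLex z).2) he)

-- ===== VERDICT (by name: the statement is the Claim_ definition above) =====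
theorem dedupe_suggestions_py_spec : Claim_equal_dedupe_suggestions_py := by
  intro items limit _
  unfold Spec_dedupe_suggestions_py
  show dedupe_suggestions_py items limit = dedupe_suggestions_py_alt items limit
  rw [dedupe_suggestions_py, dedupe_suggestions_py_alt]
  show PySem.List.slice (PySem.List.sorted2 (pvAdict items).values _ _) none (some limit)
      = PySem.List.slice (PySem.List.sorted2 (pvBest (pvF items)) _ _) none (some limit)
  rw [pvSorted_eq]
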